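-- pv_equiv track=rewrite | github.com/dralm3ida/text-cypher | text_cypher/cypher.py | calculate_key_index
-- ===== SOURCE A (Python) =====
-- printable_ascii_list = list(map(chr, range(32, 127)))
--
-- def is_number_even(value):
--    if ((value % 2) == 0):
--       return True
--    else:
--       return False
--
-- def calculate_key_index(key_value):
--    index = 0
--    for c in key_value:
--       if (is_number_even(index) == True):
--          index += printable_ascii_list.index(c)
--       else:
--          index -= printable_ascii_list.index(c)
--
--    return index
-- ===== SOURCE B (Python) =====
-- printable_ascii_list = list(map(chr, range(32, 127)))
--
-- def calculate_key_index(key_value):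
--     # Arithmetic identity: the alternating add/subtract result equals
--     # sum(values) - 2 * (sum of the values whose prefix-sum parity is odd),
--     # because the running accumulator's parity is exactly the parity of the
--     # prefix sum (subtracting preserves parity).  Staged passes, no branching
--     # accumulator: map to values, prefix parities, two sums.
--     values = [printable_ascii_list.index(c) for c in key_value]
--     parities = []
--     p = 0
--     for v in values:
--         parities.append(p)
--         p = (p + v) % 2
--     return sum(values) - 2 * sum(v for v, q in zip(values, parities) if q)
-- ===== Notes on version B (the rewrite author's own statement) =====
-- stated objective: alternative
-- what changed: Drops the branching add/subtract on the accumulator's parity and instead uses the identity result = sum(values) - 2*(sum of values whose prefix-sum parity is odd), computed in staged passes: map characters to index values, build the prefix-parity list, then one total sum and one filtered sum.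
import Mathlib
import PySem

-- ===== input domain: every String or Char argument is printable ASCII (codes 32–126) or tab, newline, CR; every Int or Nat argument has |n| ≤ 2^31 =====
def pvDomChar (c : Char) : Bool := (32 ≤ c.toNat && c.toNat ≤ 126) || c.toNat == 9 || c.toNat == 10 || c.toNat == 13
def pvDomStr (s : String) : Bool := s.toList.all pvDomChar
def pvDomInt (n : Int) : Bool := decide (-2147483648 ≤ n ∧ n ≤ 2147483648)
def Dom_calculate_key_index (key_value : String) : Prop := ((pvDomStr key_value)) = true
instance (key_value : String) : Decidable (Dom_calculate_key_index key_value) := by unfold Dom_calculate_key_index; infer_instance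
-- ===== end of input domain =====

-- B replaces the branching add/subtract on the accumulator's parity by the identity
-- result = sum(values) - 2*(sum of values at odd prefix-sum parity), in staged passes
-- (same cost); equivalence proved on Pre_ (no tab/newline/CR, where A raises ValueError).

-- ===== PORT A =====
-- printable_ascii_list = list(map(chr, range(32, 127)))
def printable_ascii_list : List Char :=
  (PySem.List.pyRange 32 127 1).map (fun n => Char.ofNat n.toNat)

-- printable_ascii_list.index(c); Python raises ValueError when absent (excluded by Pre_),
-- so the port defaults to 0 there.
def pyAsciiIndex (c : Char) : Int :=
  ((PySem.List.index? printable_ascii_list c).getD 0 : Nat)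

def is_number_even (value : Int) : Bool :=
  if PySem.Int.mod value 2 == 0 then true else false

def calculate_key_index (key_value : String) : Int :=
  key_value.toList.foldl
    (fun index c =>
      if is_number_even index = true then index + pyAsciiIndex c
      else index - pyAsciiIndex c)
    0

-- ===== PORT B =====
def calculate_key_index_alt (key_value : String) : Int :=
  let values := key_value.toList.map pyAsciiIndex
  let parities := (values.foldl
      (fun (acc : List Int × Int) v =>
        (acc.1 ++ [acc.2], PySem.Int.mod (acc.2 + v) 2))
      ([], 0)).1
  values.foldl (· + ·) 0
    - 2 * ((values.zip parities).foldl
        (fun s vq => if vq.2 ≠ 0 then s + vq.1 else s) 0)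

-- ===== PRECONDITION & SPEC =====
-- Pre_ excludes exactly the characters on which list.index raises ValueError in both
-- programs: codes outside 32..126 (within Dom these are tab/newline/CR).
def Pre_calculate_key_index (key_value : String) : Prop :=
  key_value.toList.all (fun c => 32 ≤ c.toNat && c.toNat ≤ 126) = true
instance (key_value : String) : Decidable (Pre_calculate_key_index key_value) := by
  unfold Pre_calculate_key_index; infer_instance

def pvWitness_calculate_key_index : String := "aA"

def Spec_calculate_key_index (key_value : String) (out : Int) : Prop := out = calculate_key_index_alt key_value
instance (key_value : String) (out : Int) : Decidable (Spec_calculate_key_index key_value out) := by unfold Spec_calculate_key_index; infer_instance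

-- ===== CLAIM (what is proved, stated in full; the proofs are below) =====
def Claim_equal_calculate_key_index : Prop := ∀ (key_value : String), Dom_calculate_key_index key_value → Pre_calculate_key_index key_value → Spec_calculate_key_index key_value (calculate_key_index key_value)

-- ===== LEMMAS AND PROOFS =====

-- Reference function: the alternating sum with explicit prefix accumulator p
-- (only p's parity matters).
def gAlt (l : List Int) (p : Int) : Int :=
  match l with
  | [] => 0
  | v :: t => (if p % 2 == 0 then v else -v) + gAlt t (p + v)

-- The prefix-parity list built by B's fold, in recursive form.
def parRec (p : Int) (l : List Int) : List Int :=
  match l with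
  | [] => []
  | v :: t => p :: parRec (PySem.Int.mod (p + v) 2) t

lemma mod_two_cases (a : Int) : PySem.Int.mod a 2 = a % 2 :=
  PySem.Int.mod_eq_emod_of_pos (by norm_num)

lemma g_parity (l : List Int) (p q : Int) (h : p % 2 = q % 2) :
    gAlt l p = gAlt l q := by
  induction l generalizing p q with
  | nil => rfl
  | cons v t ih =>
      simp only [gAlt, h]
      rw [ih (p + v) (q + v) (by omega)]

lemma A_fold_g (l : List Int) (index : Int) :
    l.foldl
      (fun i v => if is_number_even i = true then i + v else i - v) index
      = index + gAlt l index := by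
  induction l generalizing index with
  | nil => simp [gAlt]
  | cons v t ih =>
      simp only [List.foldl_cons, gAlt]
      by_cases h : index % 2 = 0
      · have h1 : is_number_even index = true := by
          simp [is_number_even, h]
        rw [if_pos h1, ih, if_pos (by simpa using h)]
        ring
      · have h1 : is_number_even index = false := by
          simp [is_number_even, h]
        rw [h1]
        simp only [Bool.false_eq_true, if_false]
        rw [ih, g_parity t (index - v) (index + v) (by omega),
            if_neg (by simpa using h)]
        ring

lemma parities_fold (l : List Int) (acc : List Int) (p : Int) :
    (l.foldl
      (fun (a : List Int × Int) v => (a.1 ++ [a.2], PySem.Int.mod (a.2 + v) 2))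
      (acc, p)).1 = acc ++ parRec p l := by
  induction l generalizing acc p with
  | nil => simp [parRec]
  | cons v t ih =>
      simp only [List.foldl_cons, parRec]
      rw [ih]; simp

lemma zstep_shift (lz : List (Int × Int)) (s : Int) :
    lz.foldl (fun s vq => if vq.2 ≠ 0 then s + vq.1 else s) s
      = s + lz.foldl (fun s vq => if vq.2 ≠ 0 then s + vq.1 else s) 0 := by
  induction lz generalizing s with
  | nil => simp
  | cons a t ih =>
      simp only [List.foldl_cons]
      rw [ih, ih (if a.2 ≠ 0 then 0 + a.1 else 0)]
      split_ifs <;> ring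

lemma sum_shift (l : List Int) (s : Int) :
    l.foldl (· + ·) s = s + l.foldl (· + ·) 0 := by
  induction l generalizing s with
  | nil => simp
  | cons v t ih =>
      simp only [List.foldl_cons]
      rw [ih, ih (0 + v)]; ring

lemma g_eq_B (l : List Int) (p : Int) (hp : p = 0 ∨ p = 1) :
    gAlt l p
      = l.foldl (· + ·) 0
        - 2 * ((l.zip (parRec p l)).foldl
            (fun s vq => if vq.2 ≠ 0 then s + vq.1 else s) 0) := by
  induction l generalizing p with
  | nil => simp [gAlt]
  | cons v t ih =>
      have hm : PySem.Int.mod (p + v) 2 = 0 ∨ PySem.Int.mod (p + v) 2 = 1 := by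
        rw [mod_two_cases]; omega
      simp only [gAlt, parRec, List.zip_cons_cons, List.foldl_cons]
      rw [sum_shift t (0 + v), zstep_shift,
          g_parity t (p + v) (PySem.Int.mod (p + v) 2)
            (by rw [mod_two_cases]; omega),
          ih _ hm]
      rcases hp with h | h <;> simp [h] <;> ring

-- ===== VERDICT (by name: the statement is the Claim_ definition above) =====
theorem calculate_key_index_spec : Claim_equal_calculate_key_index := by
  intro key_value _ _
  unfold Spec_calculate_key_index calculate_key_index calculate_key_index_alt
  dsimp only
  rw [parities_fold, List.nil_append]
  have hA : key_value.toList.foldl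
      (fun index c => if is_number_even index = true then index + pyAsciiIndex c
        else index - pyAsciiIndex c) 0
      = (key_value.toList.map pyAsciiIndex).foldl
        (fun i v => if is_number_even i = true then i + v else i - v) 0 := by
    rw [List.foldl_map]
  rw [hA, A_fold_g, g_eq_B (key_value.toList.map pyAsciiIndex) 0 (Or.inl rfl)]
  ring
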